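-- pv_equiv track=rewrite | github.com/mratford/advent | 2019/day10/day10.py | integer_coords
-- ===== SOURCE A (Python) =====
-- from typing import Tuple, Iterator, Dict, Set, List
--
-- def abs_gcd(x: int, y: int) -> int:
--     'Absolute greatest common denominator'
--     while y != 0:
--         t = y
--         y = x % y
--         x = t
--     return abs(x)
--
-- def integer_coords(a: Tuple[int, int], b: Tuple[int, int]) \
--         -> Iterator[Tuple[int, int]]:
--     'Return integral coordinate points between but not including a and b'
--
--     from_x, from_y = a
--     to_x, to_y = b
--     dx = to_x - from_x
--     dy = to_y - from_y
--
--     if dy == 0: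
--         step_x = -1 if dx < 0 else 1
--         step_y = 0
--     elif dx == 0:
--         step_x = 0
--         step_y = -1 if dy < 0 else 1
--     else:
--         gcd = abs_gcd(dx, dy)
--         step_x = dx // gcd
--         step_y = dy // gcd
--
--     while True:
--         from_x = from_x + step_x
--         from_y = from_y + step_y
--
--         if from_x == to_x and from_y == to_y:
--             return
--         else:
--             yield (from_x, from_y)
-- ===== SOURCE B (Python) =====
-- def integer_coords(a, b):
--     'Return integral coordinate points between but not including a and b'
--     def gcd(x, y):
--         return abs(x) if y == 0 else gcd(y, x % y)
--     dx = b[0] - a[0]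
--     dy = b[1] - a[1]
--     g = gcd(dx, dy)
--     for i in range(1, g):
--         yield (a[0] + dx * i // g, a[1] + dy * i // g)
-- ===== Notes on version B (the rewrite author's own statement) =====
-- stated objective: simpler
-- what changed: B replaces A's three-way sign/gcd case analysis and unbounded while-True loop with accumulated coordinates by a single gcd g and a bounded index loop for i in range(1,g) computing each point directly as a + d*i//g; Pre_ excludes a == b, where A's equality sentinel is never reached and the generator never terminates.
-- outside the precondition, e.g. on integer_coords((1, 2), (1, 2)): A does not finish within the time limit, B returns []
import Mathlib
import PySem

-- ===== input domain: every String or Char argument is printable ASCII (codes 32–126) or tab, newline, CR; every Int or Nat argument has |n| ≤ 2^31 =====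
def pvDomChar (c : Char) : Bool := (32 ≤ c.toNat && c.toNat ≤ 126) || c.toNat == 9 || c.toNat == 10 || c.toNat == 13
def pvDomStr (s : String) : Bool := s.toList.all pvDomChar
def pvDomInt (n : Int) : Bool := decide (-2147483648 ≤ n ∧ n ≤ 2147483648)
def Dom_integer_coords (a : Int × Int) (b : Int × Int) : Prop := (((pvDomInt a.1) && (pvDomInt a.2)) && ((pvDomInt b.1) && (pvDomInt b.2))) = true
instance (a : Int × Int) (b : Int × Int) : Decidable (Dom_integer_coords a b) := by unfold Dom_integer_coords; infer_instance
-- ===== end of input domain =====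

-- B replaces A's three-way case analysis + unbounded equality-sentinel loop by one gcd and a
-- bounded index loop computing each point directly (objective: simpler). Return value only
-- (both Pythons are generators, compared as lists).

-- termination helper for the Euclid recursions (cited by name in decreasing_by)
theorem pymod_natAbs_lt (x y : Int) (h : y ≠ 0) : (PySem.Int.mod x y).natAbs < y.natAbs := by
  rcases lt_or_gt_of_ne h with hy | hy
  · have hb := PySem.Int.mod_neg_bounds (a := x) hy
    omega
  · have h1 := PySem.Int.mod_nonneg (a := x) hy
    have h2 := PySem.Int.mod_lt (a := x) hy
    omega

-- ===== PORT A =====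
-- 'while y != 0: t = y; y = x % y; x = t' as tail recursion over the loop state (x, y)
def gcdLoopA (x y : Int) : Int :=
  if h : y = 0 then x
  else gcdLoopA y (PySem.Int.mod x y)
termination_by y.natAbs
decreasing_by exact pymod_natAbs_lt x y h

-- 'return abs(x)' after the loop
def absGcdA (x y : Int) : Int := |gcdLoopA x y|

-- the 'while True' yield loop; fuel is a totality guard only (see integer_coords)
def loopA (tox toy sx sy : Int) : Nat → Int → Int → List (Int × Int)
  | 0, _, _ => []
  | Nat.succ n, x, y =>
    let x' := x + sx
    let y' := y + sy
    if x' = tox ∧ y' = toy then []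
    else (x', y') :: loopA tox toy sx sy n x' y'

def integer_coords (a : Int × Int) (b : Int × Int) : List (Int × Int) :=
  let dx := b.1 - a.1
  let dy := b.2 - a.2
  let s : Int × Int :=
    if dy = 0 then ((if dx < 0 then -1 else 1), 0)
    else if dx = 0 then (0, (if dy < 0 then -1 else 1))
    else
      let gcd := absGcdA dx dy
      (PySem.Int.floordiv dx gcd, PySem.Int.floordiv dy gcd)
  -- fuel: whenever the while-True loop terminates it runs exactly abs_gcd(dx,dy) iterations
  loopA b.1 b.2 s.1 s.2 (absGcdA dx dy).toNat a.1 a.2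

-- ===== PORT B =====
-- B's recursive helper 'gcd(x, y) = abs(x) if y == 0 else gcd(y, x % y)'
def gcdB (x y : Int) : Int :=
  if h : y = 0 then |x|
  else gcdB y (PySem.Int.mod x y)
termination_by y.natAbs
decreasing_by exact pymod_natAbs_lt x y h

def integer_coords_alt (a : Int × Int) (b : Int × Int) : List (Int × Int) :=
  let dx := b.1 - a.1
  let dy := b.2 - a.2
  let g := gcdB dx dy
  (PySem.List.pyRange 1 g 1).map (fun i =>
    (a.1 + PySem.Int.floordiv (dx * i) g, a.2 + PySem.Int.floordiv (dy * i) g))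

-- ===== PRECONDITION & SPEC =====
-- Pre_ excludes a = b: there A's 'while True' loop steps past its equality sentinel forever
-- and the generator never terminates (no value is returned).
def Pre_integer_coords (a : Int × Int) (b : Int × Int) : Prop := a ≠ b
instance (a : Int × Int) (b : Int × Int) : Decidable (Pre_integer_coords a b) := by unfold Pre_integer_coords; infer_instance
def pvWitness_integer_coords : (Int × Int) × (Int × Int) := ((0, 0), (3, 3))

def Spec_integer_coords (a : Int × Int) (b : Int × Int) (out : List (Int × Int)) : Prop := out = integer_coords_alt a b
instance (a : Int × Int) (b : Int × Int) (out : List (Int × Int)) : Decidable (Spec_integer_coords a b out) := by unfold Spec_integer_coords; infer_instance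

-- ===== CLAIM (what is proved, stated in full; the proofs are below) =====
def Claim_equal_integer_coords : Prop := ∀ (a : Int × Int) (b : Int × Int), Dom_integer_coords a b → Pre_integer_coords a b → Spec_integer_coords a b (integer_coords a b)

-- ===== LEMMAS AND PROOFS =====

theorem pymod_eq (x y : Int) : PySem.Int.mod x y = x + (-(PySem.Int.floordiv x y)) * y := by
  have h := PySem.Int.floordiv_mul_add_mod x y
  linarith

theorem gcdLoopA_natAbs (x y : Int) : (gcdLoopA x y).natAbs = Int.gcd x y := by
  fun_induction gcdLoopA x y with
  | case1 x => simp
  | case2 x y h ih =>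
    rw [ih, pymod_eq, Int.gcd_add_mul_right_right, Int.gcd_comm]

theorem absGcdA_eq (x y : Int) : absGcdA x y = (Int.gcd x y : Int) := by
  rw [absGcdA, Int.abs_eq_natAbs, gcdLoopA_natAbs]

theorem gcdB_eq (x y : Int) : gcdB x y = (Int.gcd x y : Int) := by
  fun_induction gcdB x y with
  | case1 x => rw [Int.abs_eq_natAbs]; simp
  | case2 x y h ih =>
    rw [ih, pymod_eq, Int.gcd_add_mul_right_right, Int.gcd_comm]

theorem fdiv_exact {d g : Int} (h : g ∣ d) :
    PySem.Int.floordiv d g * g = d := by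
  have h1 := PySem.Int.floordiv_mul_add_mod d g
  have h2 : PySem.Int.mod d g = 0 := (PySem.Int.mod_eq_zero_iff_dvd d g).mpr h
  linarith

theorem floordiv_mul_self {g : Int} (m : Int) (hg : g ≠ 0) :
    PySem.Int.floordiv (m * g) g = m :=
  mul_right_cancel₀ hg (fdiv_exact (dvd_mul_left g m))

theorem loopA_succ (tox toy sx sy : Int) (n : Nat) (x y : Int) :
    loopA tox toy sx sy (n + 1) x y
      = if x + sx = tox ∧ y + sy = toy then []
        else (x + sx, y + sy) :: loopA tox toy sx sy n (x + sx) (y + sy) := rfl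

theorem loopA_eq (sx sy : Int) (h : ¬(sx = 0 ∧ sy = 0)) :
    ∀ (n : Nat) (x y : Int),
      loopA (x + ((n : Int) + 1) * sx) (y + ((n : Int) + 1) * sy) sx sy (n + 1) x y
        = (List.range n).map (fun (i : Nat) => (x + ((i : Int) + 1) * sx, y + ((i : Int) + 1) * sy)) := by
  intro n
  induction n with
  | zero =>
    intro x y
    simp [loopA_succ]
  | succ n ih =>
    intro x y
    rw [loopA_succ]
    have hcond : ¬(x + sx = x + (((n + 1 : Nat) : Int) + 1) * sx ∧ y + sy = y + (((n + 1 : Nat) : Int) + 1) * sy) := by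
      push_cast
      rintro ⟨h1, h2⟩
      apply h
      have e1 : ((n : Int) + 1) * sx = 0 := by linarith
      have e2 : ((n : Int) + 1) * sy = 0 := by linarith
      have hn : ((n : Int) + 1) ≠ 0 := by omega
      exact ⟨(mul_eq_zero.mp e1).resolve_left hn, (mul_eq_zero.mp e2).resolve_left hn⟩
    rw [if_neg hcond]
    have harg1 : x + (((n + 1 : Nat) : Int) + 1) * sx = (x + sx) + ((n : Int) + 1) * sx := by push_cast; ring
    have harg2 : y + (((n + 1 : Nat) : Int) + 1) * sy = (y + sy) + ((n : Int) + 1) * sy := by push_cast; ring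
    rw [harg1, harg2, ih (x + sx) (y + sy)]
    rw [List.range_succ_eq_map, List.map_cons, List.map_map]
    congr 1
    · simp only [Prod.mk.injEq]
      push_cast
      constructor <;> ring
    · apply List.map_congr_left
      intro i _
      simp only [Function.comp, Prod.mk.injEq]
      push_cast
      constructor <;> ring

theorem main_core (a b : Int × Int) (sx sy : Int) (n : Nat)
    (h1 : b.1 = a.1 + ((n : Int) + 1) * sx) (h2 : b.2 = a.2 + ((n : Int) + 1) * sy)
    (h : ¬(sx = 0 ∧ sy = 0)) :
    loopA b.1 b.2 sx sy (n + 1) a.1 a.2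
      = (List.range n).map (fun (i : Nat) => (a.1 + ((i : Int) + 1) * sx, a.2 + ((i : Int) + 1) * sy)) := by
  rw [h1, h2]
  exact loopA_eq sx sy h n a.1 a.2

theorem alt_core (a : Int × Int) (sx sy dx dy : Int) (n : Nat)
    (h1 : dx = ((n : Int) + 1) * sx) (h2 : dy = ((n : Int) + 1) * sy) :
    (PySem.List.pyRange 1 ((n : Int) + 1) 1).map (fun i =>
        (a.1 + PySem.Int.floordiv (dx * i) ((n : Int) + 1),
         a.2 + PySem.Int.floordiv (dy * i) ((n : Int) + 1)))
      = (List.range n).map (fun (i : Nat) => (a.1 + ((i : Int) + 1) * sx, a.2 + ((i : Int) + 1) * sy)) := by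
  have hn : ((n : Int) + 1) ≠ 0 := by omega
  rw [PySem.List.pyRange_one, List.map_map]
  have hlen : ((n : Int) + 1 - 1).toNat = n := by omega
  rw [hlen]
  apply List.map_congr_left
  intro i _
  simp only [Function.comp, Prod.mk.injEq]
  constructor
  · rw [h1, show ((n : Int) + 1) * sx * (1 + (i : Int)) = (sx * (1 + (i : Int))) * ((n : Int) + 1) by ring,
        floordiv_mul_self _ hn]
    ring
  · rw [h2, show ((n : Int) + 1) * sy * (1 + (i : Int)) = (sy * (1 + (i : Int))) * ((n : Int) + 1) by ring,
        floordiv_mul_self _ hn]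
    ring

-- ===== VERDICT =====
theorem integer_coords_spec : Claim_equal_integer_coords := by
  intro a b _ hpre
  unfold Spec_integer_coords integer_coords integer_coords_alt
  simp only []
  set dx := b.1 - a.1 with hdx
  set dy := b.2 - a.2 with hdy
  have hne : ¬(dx = 0 ∧ dy = 0) := by
    rintro ⟨h1, h2⟩
    exact hpre (Prod.ext (by omega) (by omega)).symm
  set g : Nat := Int.gcd dx dy with hgdef
  have hgpos : 0 < g := Int.gcd_pos_iff.mpr (by tauto)
  obtain ⟨n, hn⟩ : ∃ n : Nat, g = n + 1 := ⟨g - 1, by omega⟩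
  have hA : absGcdA dx dy = ((n : Int) + 1) := by
    rw [absGcdA_eq, ← hgdef, hn]; push_cast; ring
  have hB : gcdB dx dy = ((n : Int) + 1) := by
    rw [gcdB_eq, ← hgdef, hn]; push_cast; ring
  set s : Int × Int :=
    (if dy = 0 then ((if dx < 0 then -1 else 1 : Int), (0 : Int))
     else if dx = 0 then ((0 : Int), (if dy < 0 then -1 else 1))
     else (PySem.Int.floordiv dx (absGcdA dx dy), PySem.Int.floordiv dy (absGcdA dx dy))) with hs
  have hstep : s.1 * ((n : Int) + 1) = dx ∧ s.2 * ((n : Int) + 1) = dy := by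
    have hg' : ((n : Int) + 1) = (g : Int) := by rw [hn]; push_cast; ring
    rw [hs, hg']
    split_ifs with h1 h2 h3 h4
    · have e : g = dx.natAbs := by rw [hgdef, h1]; exact Int.gcd_zero_right dx
      rw [e]; simp only; omega
    · have e : g = dx.natAbs := by rw [hgdef, h1]; exact Int.gcd_zero_right dx
      have hdx0 : dx ≠ 0 := fun hh => hne ⟨hh, h1⟩
      rw [e]; simp only; omega
    · have e : g = dy.natAbs := by rw [hgdef, h3]; exact Int.gcd_zero_left dy
      rw [e]; simp only; omega
    · have e : g = dy.natAbs := by rw [hgdef, h3]; exact Int.gcd_zero_left dy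
      rw [e]; simp only; omega
    · simp only [absGcdA_eq]
      exact ⟨fdiv_exact (Int.gcd_dvd_left dx dy), fdiv_exact (Int.gcd_dvd_right dx dy)⟩
  have hsnz : ¬(s.1 = 0 ∧ s.2 = 0) := by
    rintro ⟨h1, h2⟩
    apply hne
    constructor
    · rw [← hstep.1, h1]; ring
    · rw [← hstep.2, h2]; ring
  rw [hA, hB]
  have htn : (((n : Int) + 1)).toNat = n + 1 := by omega
  rw [htn]
  rw [main_core a b s.1 s.2 n (by have h := hstep.1; rw [hdx] at h; linarith) (by have h := hstep.2; rw [hdy] at h; linarith) hsnz]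
  rw [alt_core a s.1 s.2 dx dy n (by have := hstep.1; linarith) (by have := hstep.2; linarith)]
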